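-- pv_equiv track=rewrite | github.com/arjandepooter/codejam-2018 | qual/03.py | determine_cell
-- ===== SOURCE A (Python) =====
-- def number_of_cells(grid, X, Y):
--     n = 0
--     for x in range(X - 1, X + 2):
--         for y in range(Y - 1, Y + 2):
--             if (x, y) in grid:
--                 n += 1
--
--     return n
--
-- def determine_cell(grid, X, Y):
--     r = (10, 0, 0)
--     for x in range(2, X):
--         for y in range(2, Y):
--             n = number_of_cells(grid, x, y)
--             if n == 0:
--                 return x, y
--             if n < r[0]:
--                 r = (n, x, y)
--     return r[1], r[2]
-- ===== SOURCE B (Python) =====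
-- def determine_cell(grid, X, Y):
--     # Two staged passes instead of A's stateful scan: first look for the first
--     # empty interior cell (A's early return); if none exists, every interior
--     # cell touches the grid, so the cell list is small and A's answer is just
--     # the first cell of minimal neighbor count: one stable min, no sentinel.
--     occupied = set(grid)
--
--     def neighbors(c):
--         x, y = c
--         return sum((x + dx, y + dy) in occupied
--                    for dx in (-1, 0, 1) for dy in (-1, 0, 1))
--
--     first_zero = next((c for c in ((x, y) for x in range(2, X) for y in range(2, Y))
--                        if neighbors(c) == 0), None)
--     if first_zero is not None:
--         return first_zero
--     cells = [(x, y) for x in range(2, X) for y in range(2, Y)]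
--     if not cells:
--         return 0, 0
--     return min(cells, key=neighbors)
-- ===== Notes on version B (the rewrite author's own statement) =====
-- stated objective: alternative
-- what changed: A is one column-major scan holding mutable state (early return on count 0, running minimum from sentinel 10); B is two staged stateless passes: next() finds the first empty interior cell, and only if none exists (so the cell list is small) a stable min(cells, key=neighbors) — counts lie in 0..9, so A's running minimum is exactly the first cell of minimal count; neighbor counts are read from a set instead of nine list scans.
import Mathlib
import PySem

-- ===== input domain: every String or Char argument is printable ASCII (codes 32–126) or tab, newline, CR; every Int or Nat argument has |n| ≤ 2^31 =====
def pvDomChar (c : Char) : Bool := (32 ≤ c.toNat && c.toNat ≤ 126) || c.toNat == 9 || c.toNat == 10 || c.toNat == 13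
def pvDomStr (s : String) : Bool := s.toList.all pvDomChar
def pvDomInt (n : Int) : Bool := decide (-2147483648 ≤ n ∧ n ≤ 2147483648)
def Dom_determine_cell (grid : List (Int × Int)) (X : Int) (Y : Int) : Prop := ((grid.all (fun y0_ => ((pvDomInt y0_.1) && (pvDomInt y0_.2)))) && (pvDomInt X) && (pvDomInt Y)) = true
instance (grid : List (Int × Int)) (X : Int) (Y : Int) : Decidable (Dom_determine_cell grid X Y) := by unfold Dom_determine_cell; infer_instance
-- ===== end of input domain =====

-- B replaces A's stateful scan (early return on count 0, running minimum from sentinel 10)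
-- by two staged stateless passes: find? for the first empty interior cell, else one stable
-- min over the cell list keyed by the neighbor count read from a set; an alternative
-- decomposition of the same cost.

-- ===== PORT A =====
def number_of_cells (grid : List (Int × Int)) (X : Int) (Y : Int) : Int :=
  (PySem.List.pyRange (X - 1) (X + 2) 1).foldl (fun n x =>
    (PySem.List.pyRange (Y - 1) (Y + 2) 1).foldl (fun n y =>
      if (x, y) ∈ grid then n + 1 else n) n) 0

-- inner 'for y in range(2, Y)' loop of A (lazy range as a counter); .inl = early return, .inr = updated r
def detA_loopY (grid : List (Int × Int)) (x Y : Int) (y : Int) (r : Int × Int × Int) :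
    Sum (Int × Int) (Int × Int × Int) :=
  if y < Y then
    let n := number_of_cells grid x y
    if n = 0 then .inl (x, y)
    else detA_loopY grid x Y (y + 1) (if n < r.1 then (n, x, y) else r)
  else .inr r
termination_by (Y - y).toNat
decreasing_by omega

-- outer 'for x in range(2, X)' loop of A
def detA_loopX (grid : List (Int × Int)) (X Y : Int) (x : Int) (r : Int × Int × Int) :
    Sum (Int × Int) (Int × Int × Int) :=
  if x < X then
    match detA_loopY grid x Y 2 r with
    | .inl p => .inl p
    | .inr r' => detA_loopX grid X Y (x + 1) r'
  else .inr r
termination_by (X - x).toNat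
decreasing_by omega

def determine_cell (grid : List (Int × Int)) (X : Int) (Y : Int) : Int × Int :=
  match detA_loopX grid X Y 2 (10, 0, 0) with
  | .inl p => p
  | .inr r => (r.2.1, r.2.2)

-- ===== PORT B =====
-- 'sum((x+dx, y+dy) in occupied for dx in (-1,0,1) for dy in (-1,0,1))'
def detB_neighbors (occupied : PySem.Set (Int × Int)) (c : Int × Int) : Int :=
  (([-1, 0, 1] : List Int).flatMap (fun dx =>
    ([-1, 0, 1] : List Int).map (fun dy =>
      if (c.1 + dx, c.2 + dy) ∈ occupied then (1 : Int) else 0))).sum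

-- 'cells = [(x, y) for x in range(2, X) for y in range(2, Y)]'
def detB_cells (X Y : Int) : List (Int × Int) :=
  (PySem.List.pyRange 2 X 1).flatMap (fun x =>
    (PySem.List.pyRange 2 Y 1).map (fun y => (x, y)))

-- the lazy generator search 'next((c for c in cells if neighbors(c) == 0), None)',
-- ported with the generator's on-demand evaluation made explicit (inner / outer range)
def detB_findZeroY (occ : PySem.Set (Int × Int)) (x Y y : Int) : Option (Int × Int) :=
  if y < Y then
    if detB_neighbors occ (x, y) == 0 then some (x, y)
    else detB_findZeroY occ x Y (y + 1)
  else none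
termination_by (Y - y).toNat
decreasing_by omega

def detB_findZeroX (occ : PySem.Set (Int × Int)) (X Y x : Int) : Option (Int × Int) :=
  if x < X then
    match detB_findZeroY occ x Y 2 with
    | some c => some c
    | none => detB_findZeroX occ X Y (x + 1)
  else none
termination_by (X - x).toNat
decreasing_by omega

def determine_cell_alt (grid : List (Int × Int)) (X : Int) (Y : Int) : Int × Int :=
  match detB_findZeroX (PySem.Set.ofList grid) X Y 2 with
  | some c => c
  | none =>
    match PySem.List.min? (detB_cells X Y) (detB_neighbors (PySem.Set.ofList grid)) with
    | some c => c
    | none => (0, 0)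

-- ===== PRECONDITION & SPEC =====
def Spec_determine_cell (grid : List (Int × Int)) (X : Int) (Y : Int) (out : Int × Int) : Prop := out = determine_cell_alt grid X Y
instance (grid : List (Int × Int)) (X : Int) (Y : Int) (out : Int × Int) : Decidable (Spec_determine_cell grid X Y out) := by unfold Spec_determine_cell; infer_instance

-- ===== CLAIM (what is proved, stated in full; the proofs are below) =====
def Claim_equal_determine_cell : Prop := ∀ (grid : List (Int × Int)) (X : Int) (Y : Int), Dom_determine_cell grid X Y → Spec_determine_cell grid X Y (determine_cell grid X Y)

-- ===== LEMMAS AND PROOFS =====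

theorem range3 (x : Int) : PySem.List.pyRange (x - 1) (x + 2) 1 = [x - 1, x, x + 1] := by
  rw [PySem.List.pyRange_one_cons (by omega), PySem.List.pyRange_one_cons (by omega),
      PySem.List.pyRange_one_cons (by omega), PySem.List.pyRange_one_eq_nil (by omega)]
  norm_num

-- the inner membership loop of number_of_cells is a countP (instance of PySem.List.foldl_count_if)
theorem foldl_mem_count (grid : List (Int × Int)) (x' : Int) (l : List Int) (n : Int) :
    l.foldl (fun n y' => if (x', y') ∈ grid then n + 1 else n) n
      = n + (l.countP (fun y' => decide ((x', y') ∈ grid)) : Int) := by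
  simpa using PySem.List.foldl_count_if (fun y' => decide ((x', y') ∈ grid)) l n

theorem noc_count (grid : List (Int × Int)) (x y : Int) :
    number_of_cells grid x y
      = ([y - 1, y, y + 1].countP (fun y' => decide ((x - 1, y') ∈ grid)) : Int)
      + ([y - 1, y, y + 1].countP (fun y' => decide ((x, y') ∈ grid)) : Int)
      + ([y - 1, y, y + 1].countP (fun y' => decide ((x + 1, y') ∈ grid)) : Int) := by
  unfold number_of_cells
  rw [range3, range3]
  rw [List.foldl_cons, List.foldl_cons, List.foldl_cons, List.foldl_nil]
  rw [foldl_mem_count, foldl_mem_count, foldl_mem_count]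
  ring

theorem noc_bounds (grid : List (Int × Int)) (x y : Int) :
    0 ≤ number_of_cells grid x y ∧ number_of_cells grid x y ≤ 9 := by
  rw [noc_count]
  have h1 := List.countP_le_length (l := [y - 1, y, y + 1])
      (p := fun y' => decide ((x - 1, y') ∈ grid))
  have h2 := List.countP_le_length (l := [y - 1, y, y + 1])
      (p := fun y' => decide ((x, y') ∈ grid))
  have h3 := List.countP_le_length (l := [y - 1, y, y + 1])
      (p := fun y' => decide ((x + 1, y') ∈ grid))
  simp only [List.length_cons, List.length_nil] at h1 h2 h3
  omega

-- B's neighbor count equals A's number_of_cells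
theorem neighbors_eq_noc (grid : List (Int × Int)) (x y : Int) :
    detB_neighbors (PySem.Set.ofList grid) (x, y) = number_of_cells grid x y := by
  rw [noc_count]
  simp only [detB_neighbors, List.flatMap_cons, List.flatMap_nil, List.append_nil,
    List.map_cons, List.map_nil, List.sum_append, List.sum_cons, List.sum_nil,
    List.countP_cons, List.countP_nil, PySem.Set.mem_ofList, decide_eq_true_eq,
    ← sub_eq_add_neg, add_zero]
  push_cast
  ring

-- A's loop body as a fold step over the cell list (early return = absorbing .inl)
def stepA (grid : List (Int × Int)) (s : Sum (Int × Int) (Int × Int × Int)) (c : Int × Int) :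
    Sum (Int × Int) (Int × Int × Int) :=
  match s with
  | .inl p => .inl p
  | .inr r =>
    let n := number_of_cells grid c.1 c.2
    if n = 0 then .inl c
    else .inr (if n < r.1 then (n, c.1, c.2) else r)

theorem foldl_stepA_inl (grid : List (Int × Int)) (p : Int × Int) (l : List (Int × Int)) :
    l.foldl (stepA grid) (.inl p) = .inl p := by
  induction l with
  | nil => rfl
  | cons c l ih => simpa [stepA] using ih

theorem loopY_eq_foldl (grid : List (Int × Int)) (x Y : Int) :
    ∀ (k : Nat) (y : Int), (Y - y).toNat = k → ∀ r,
    detA_loopY grid x Y y r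
      = ((PySem.List.pyRange y Y 1).map (fun y' => (x, y'))).foldl (stepA grid) (.inr r) := by
  intro k
  induction k with
  | zero =>
    intro y hk r
    rw [detA_loopY, if_neg (by omega), PySem.List.pyRange_one_eq_nil (by omega)]
    rfl
  | succ k ih =>
    intro y hk r
    rw [detA_loopY, if_pos (by omega), PySem.List.pyRange_one_cons (by omega),
        List.map_cons, List.foldl_cons]
    simp only [stepA]
    by_cases h0 : number_of_cells grid x y = 0
    · rw [if_pos h0, if_pos h0, foldl_stepA_inl]
    · rw [if_neg h0, if_neg h0, ih (y + 1) (by omega)]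

theorem loopX_eq_foldl (grid : List (Int × Int)) (X Y : Int) :
    ∀ (k : Nat) (x : Int), (X - x).toNat = k → ∀ r,
    detA_loopX grid X Y x r
      = ((PySem.List.pyRange x X 1).flatMap (fun x' =>
          (PySem.List.pyRange 2 Y 1).map (fun y => (x', y)))).foldl (stepA grid) (.inr r) := by
  intro k
  induction k with
  | zero =>
    intro x hk r
    rw [detA_loopX, if_neg (by omega),
        PySem.List.pyRange_one_eq_nil (a := x) (b := X) (by omega)]
    rfl
  | succ k ih =>
    intro x hk r
    rw [detA_loopX, if_pos (by omega),
        PySem.List.pyRange_one_cons (a := x) (b := X) (by omega),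
        List.flatMap_cons, List.foldl_append,
        ← loopY_eq_foldl grid x Y (Y - 2).toNat 2 rfl r]
    match h : detA_loopY grid x Y 2 r with
    | .inl p => rw [foldl_stepA_inl]
    | .inr r' => exact ih (x + 1) (by omega) r'

-- min?'s fold step, with the key abstracted
def stepM (key : Int × Int → Int) (acc : Option (Int × Int)) (c : Int × Int) :
    Option (Int × Int) :=
  match acc with
  | none => some c
  | some m => if key c < key m then some c else some m

theorem min?_eq_foldl_stepM (xs : List (Int × Int)) (key : Int × Int → Int) :
    PySem.List.min? xs key = xs.foldl (stepM key) none := by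
  unfold PySem.List.min?
  congr 1
  funext acc c
  cases acc <;> rfl

-- the coupling invariant between A's scan state and min?'s accumulator
def ScanRel (grid : List (Int × Int)) (s : Sum (Int × Int) (Int × Int × Int))
    (acc : Option (Int × Int)) : Prop :=
  (∃ p, s = .inl p ∧ acc = some p ∧ number_of_cells grid p.1 p.2 = 0)
  ∨ (s = .inr (10, 0, 0) ∧ acc = none)
  ∨ (∃ m, s = .inr (number_of_cells grid m.1 m.2, m.1, m.2) ∧ acc = some m
        ∧ 0 < number_of_cells grid m.1 m.2)

theorem step_rel (grid : List (Int × Int)) (s : Sum (Int × Int) (Int × Int × Int))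
    (acc : Option (Int × Int)) (c : Int × Int) (h : ScanRel grid s acc) :
    ScanRel grid (stepA grid s c) (stepM (fun c => number_of_cells grid c.1 c.2) acc c) := by
  have hb := noc_bounds grid c.1 c.2
  rcases h with ⟨p, hs, ha, hp⟩ | ⟨hs, ha⟩ | ⟨m, hs, ha, hm⟩
  · subst hs; subst ha
    have hbp := noc_bounds grid p.1 p.2
    simp only [stepA, stepM]
    rw [if_neg (by omega)]
    exact .inl ⟨p, rfl, rfl, hp⟩
  · subst hs; subst ha
    simp only [stepA, stepM]
    by_cases h0 : number_of_cells grid c.1 c.2 = 0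
    · rw [if_pos h0]
      exact .inl ⟨c, rfl, rfl, h0⟩
    · rw [if_neg h0, if_pos (by omega)]
      exact .inr (.inr ⟨c, rfl, rfl, by omega⟩)
  · subst hs; subst ha
    simp only [stepA, stepM]
    by_cases h0 : number_of_cells grid c.1 c.2 = 0
    · rw [if_pos h0, if_pos (by omega)]
      exact .inl ⟨c, rfl, rfl, h0⟩
    · rw [if_neg h0]
      by_cases hlt : number_of_cells grid c.1 c.2 < number_of_cells grid m.1 m.2
      · rw [if_pos hlt, if_pos hlt]
        exact .inr (.inr ⟨c, rfl, rfl, by omega⟩)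
      · rw [if_neg hlt, if_neg hlt]
        exact .inr (.inr ⟨m, rfl, rfl, hm⟩)

theorem fold_rel (grid : List (Int × Int)) (l : List (Int × Int)) :
    ∀ s acc, ScanRel grid s acc →
    ScanRel grid (l.foldl (stepA grid) s)
      (l.foldl (stepM (fun c => number_of_cells grid c.1 c.2)) acc) := by
  induction l with
  | nil => intro s acc h; exact h
  | cons c l ih =>
    intro s acc h
    exact ih _ _ (step_rel grid s acc c h)

-- a minimum of zero is absorbing for min?'s fold step
theorem foldl_stepM_zero (key : Int × Int → Int) (m : Int × Int) (hm : key m = 0) :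
    ∀ l : List (Int × Int), (∀ c ∈ l, 0 ≤ key c) → l.foldl (stepM key) (some m) = some m := by
  intro l
  induction l with
  | nil => intro _; rfl
  | cons c t ih =>
    intro h
    have hc : ¬ key c < key m := by
      have := h c (by simp)
      omega
    simp only [List.foldl_cons, stepM, if_neg hc]
    exact ih fun c' hc' => h c' (by simp [hc'])

-- with nonnegative keys, the first zero-key element is the stable minimum
theorem find?_zero_min (key : Int × Int → Int) :
    ∀ (l : List (Int × Int)) (acc : Option (Int × Int)) (c : Int × Int),
    (acc = none ∨ ∃ m, acc = some m ∧ 0 < key m) →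
    (∀ c' ∈ l, 0 ≤ key c') →
    l.find? (fun c' => key c' == 0) = some c →
    l.foldl (stepM key) acc = some c := by
  intro l
  induction l with
  | nil =>
    intro acc c _ _ hf
    simp at hf
  | cons d t ih =>
    intro acc c hacc hnn hf
    by_cases h0 : key d = 0
    · rw [List.find?_cons_of_pos (by simpa using h0), Option.some_inj] at hf
      have hstep : stepM key acc d = some d := by
        rcases hacc with h | ⟨m, hm, hmp⟩ <;> subst_vars <;> simp [stepM] <;> omega
      rw [List.foldl_cons, hstep, ← hf]
      exact foldl_stepM_zero key d h0 t fun c' hc' => hnn c' (by simp [hc'])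
    · rw [List.find?_cons_of_neg (by simpa using h0)] at hf
      rw [List.foldl_cons]
      have hd : 0 < key d := by
        have := hnn d (by simp)
        omega
      refine ih (stepM key acc d) c ?_ (fun c' hc' => hnn c' (by simp [hc'])) hf
      rcases hacc with h | ⟨m, hm, hmp⟩ <;> subst_vars
      · exact .inr ⟨d, rfl, hd⟩
      · by_cases hlt : key d < key m
        · exact .inr ⟨d, by simp [stepM, if_pos hlt], hd⟩
        · exact .inr ⟨m, by simp [stepM, if_neg hlt], hmp⟩

-- the lazy search is find? over the materialized cell list
theorem findZeroY_eq (occ : PySem.Set (Int × Int)) (x Y : Int) :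
    ∀ (k : Nat) (y : Int), (Y - y).toNat = k →
    detB_findZeroY occ x Y y
      = ((PySem.List.pyRange y Y 1).map (fun y' => (x, y'))).find?
          (fun c => detB_neighbors occ c == 0) := by
  intro k
  induction k with
  | zero =>
    intro y hk
    rw [detB_findZeroY, if_neg (by omega), PySem.List.pyRange_one_eq_nil (by omega)]
    rfl
  | succ k ih =>
    intro y hk
    rw [detB_findZeroY, if_pos (by omega), PySem.List.pyRange_one_cons (by omega),
        List.map_cons]
    by_cases h0 : (detB_neighbors occ (x, y) == 0) = true
    · rw [if_pos h0]
      exact (List.find?_cons_of_pos (p := fun c => detB_neighbors occ c == 0)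
        (a := (x, y)) h0).symm
    · rw [if_neg h0, List.find?_cons_of_neg (by simpa using h0), ih (y + 1) (by omega)]

theorem findZeroX_eq (occ : PySem.Set (Int × Int)) (X Y : Int) :
    ∀ (k : Nat) (x : Int), (X - x).toNat = k →
    detB_findZeroX occ X Y x
      = ((PySem.List.pyRange x X 1).flatMap (fun x' =>
          (PySem.List.pyRange 2 Y 1).map (fun y => (x', y)))).find?
          (fun c => detB_neighbors occ c == 0) := by
  intro k
  induction k with
  | zero =>
    intro x hk
    rw [detB_findZeroX, if_neg (by omega),
        PySem.List.pyRange_one_eq_nil (a := x) (b := X) (by omega)]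
    rfl
  | succ k ih =>
    intro x hk
    rw [detB_findZeroX, if_pos (by omega),
        PySem.List.pyRange_one_cons (a := x) (b := X) (by omega),
        List.flatMap_cons, List.find?_append, findZeroY_eq occ x Y (Y - 2).toNat 2 rfl,
        ih (x + 1) (by omega)]
    match (List.map (fun y => (x, y)) (PySem.List.pyRange 2 Y 1)).find?
        (fun c => detB_neighbors occ c == 0) with
    | some c => rfl
    | none => rfl

-- ===== VERDICT (by name: the statement is the Claim_ definition above) =====
theorem determine_cell_spec : Claim_equal_determine_cell := by
  intro grid X Y _
  unfold Spec_determine_cell determine_cell determine_cell_alt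
  have hkey : detB_neighbors (PySem.Set.ofList grid) = fun c => number_of_cells grid c.1 c.2 := by
    funext c
    cases c with
    | mk x y => exact neighbors_eq_noc grid x y
  rw [loopX_eq_foldl grid X Y (X - 2).toNat 2 rfl (10, 0, 0), hkey, min?_eq_foldl_stepM]
  rw [show (PySem.List.pyRange 2 X 1).flatMap (fun x' =>
        (PySem.List.pyRange 2 Y 1).map (fun y => (x', y))) = detB_cells X Y from rfl]
  have h := fold_rel grid (detB_cells X Y) (.inr (10, 0, 0)) none (.inr (.inl ⟨rfl, rfl⟩))
  have hnn : ∀ c' ∈ detB_cells X Y, 0 ≤ (fun c => number_of_cells grid c.1 c.2) c' :=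
    fun c' _ => (noc_bounds grid c'.1 c'.2).1
  rw [findZeroX_eq (PySem.Set.ofList grid) X Y (X - 2).toNat 2 rfl,
      show (PySem.List.pyRange 2 X 1).flatMap (fun x' =>
        (PySem.List.pyRange 2 Y 1).map (fun y => (x', y))) = detB_cells X Y from rfl, hkey]
  match hf : (detB_cells X Y).find?
      (fun c => (fun c => number_of_cells grid c.1 c.2) c == 0) with
  | some c =>
    have hmin := find?_zero_min (fun c => number_of_cells grid c.1 c.2)
      (detB_cells X Y) none c (.inl rfl) hnn hf
    rcases h with ⟨p, hs, ha, _⟩ | ⟨hs, ha⟩ | ⟨m, hs, ha, _⟩ <;> rw [hs] <;>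
      rw [ha] at hmin <;> simp_all
  | none =>
    rcases h with ⟨p, hs, ha, _⟩ | ⟨hs, ha⟩ | ⟨m, hs, ha, _⟩ <;> rw [hs, ha, hf]
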